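-- pv_equiv track=rewrite | github.com/xshinhe/PSiNad | generate_helper/generate_pybind11.py | sweep_scope
-- ===== SOURCE A (Python) =====
-- def sweep_scope(lines, istart):
--     cnt_1 = 0 # count for ( and )
--     cnt_2 = 0 # count for { and }
--     max_1 = 0
--     max_2 = 0
--     for i in range(istart, len(lines)):
--         cnt_1 += lines[i].count('(')
--         cnt_2 += lines[i].count('{')
--         max_1 = max(max_1, cnt_1)
--         max_2 = max(max_2, cnt_2)
--         cnt_1 -= lines[i].count(')')
--         cnt_2 -= lines[i].count('}')
--         if cnt_1 == 0 and cnt_2 == 0: # and ';' in lines[i]: # may not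
--             return i, max_1, max_2
--     return istart, 0, 0
-- ===== SOURCE B (Python) =====
-- def sweep_scope(lines, istart):
--     # Two-phase: prefix balances per line, find first line where both hit zero,
--     # then recompute the two peaks over that prefix.
--     tail = lines[istart:]
--     bal = []
--     b1 = b2 = 0
--     for s in tail:
--         b1 += s.count('(') - s.count(')')
--         b2 += s.count('{') - s.count('}')
--         bal.append((b1, b2))
--     if (0, 0) not in bal:
--         return istart, 0, 0
--     k = bal.index((0, 0))
--     m1 = m2 = 0
--     for (x, y), s in zip(bal[:k + 1], tail[:k + 1]):
--         m1 = max(m1, x + s.count(')'))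
--         m2 = max(m2, y + s.count('}'))
--     return istart + k, m1, m2
-- ===== Notes on version B (the rewrite author's own statement) =====
-- stated objective: alternative
-- what changed: Replaces A's single stateful scan with early return by a two-phase decomposition: build the list of per-line prefix balances, locate the first line where both balances are zero with list.index, then recompute the two peaks (balance-after-line plus that line's close count) over just that prefix.
-- outside the precondition, e.g. on sweep_scope(['(', ')'], -1): A returns (0, 0, 0), B returns (-1, 0, 0)
import Mathlib
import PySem

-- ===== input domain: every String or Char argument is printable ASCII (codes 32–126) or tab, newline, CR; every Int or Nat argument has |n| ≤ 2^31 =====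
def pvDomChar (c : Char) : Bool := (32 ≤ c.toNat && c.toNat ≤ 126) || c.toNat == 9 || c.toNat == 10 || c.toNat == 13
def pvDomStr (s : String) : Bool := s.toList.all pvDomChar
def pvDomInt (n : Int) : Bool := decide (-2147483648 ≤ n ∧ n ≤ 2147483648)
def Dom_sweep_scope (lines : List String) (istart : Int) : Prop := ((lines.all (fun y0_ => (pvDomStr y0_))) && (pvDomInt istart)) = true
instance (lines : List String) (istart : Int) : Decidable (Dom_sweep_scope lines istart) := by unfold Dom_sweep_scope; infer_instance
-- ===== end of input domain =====

-- B replaces A's single stateful scan by a two-phase decomposition (per-line prefix balances, first all-zero line via list.index, peaks recomputed over that prefix); alternative structure, no speed claim.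


-- ===== PORT A =====
-- A's for-loop over range(istart, len(lines)) with early return; lines[i] via pyGetD
-- (inside Pre_, every visited index i satisfies 0 ≤ i < len, so the default "" is never consulted)
def sweepLoopA (lines : List String) (idxs : List Int) (cnt1 cnt2 max1 max2 istart : Int) : Int × Int × Int :=
  match idxs with
  | [] => (istart, 0, 0)
  | i :: rest =>
    let s := PySem.List.pyGetD lines i ""
    let cnt1 := cnt1 + (PySem.Str.count s "(" : Int)
    let cnt2 := cnt2 + (PySem.Str.count s "{" : Int)
    let max1 := max max1 cnt1
    let max2 := max max2 cnt2
    let cnt1 := cnt1 - (PySem.Str.count s ")" : Int)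
    let cnt2 := cnt2 - (PySem.Str.count s "}" : Int)
    if cnt1 = 0 ∧ cnt2 = 0 then (i, max1, max2)
    else sweepLoopA lines rest cnt1 cnt2 max1 max2 istart

def sweep_scope (lines : List String) (istart : Int) : Int × Int × Int :=
  sweepLoopA lines (PySem.List.pyRange istart (lines.length : Int) 1) 0 0 0 0 istart

-- ===== PORT B =====
-- phase 1 of Source B: the list of per-line prefix balances
def sweepScanB (tail : List String) (b1 b2 : Int) : List (Int × Int) :=
  match tail with
  | [] => []
  | s :: rest =>
    let b1 := b1 + ((PySem.Str.count s "(" : Int) - (PySem.Str.count s ")" : Int))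
    let b2 := b2 + ((PySem.Str.count s "{" : Int) - (PySem.Str.count s "}" : Int))
    (b1, b2) :: sweepScanB rest b1 b2

def sweep_scope_alt (lines : List String) (istart : Int) : Int × Int × Int :=
  let tail := PySem.List.slice lines (some istart) none
  let bal := sweepScanB tail 0 0
  match PySem.List.index? bal ((0 : Int), (0 : Int)) with
  | none => (istart, 0, 0)
  | some k =>
    let pre := (bal.take (k + 1)).zip (tail.take (k + 1))
    let ms := pre.foldl
      (fun m p => (max m.1 (p.1.1 + (PySem.Str.count p.2 ")" : Int)),
                   max m.2 (p.1.2 + (PySem.Str.count p.2 "}" : Int)))) ((0 : Int), (0 : Int))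
    (istart + k, ms.1, ms.2)

-- ===== PRECONDITION & SPEC =====
-- Pre_ restricts to the natural domain 0 ≤ istart (istart is a starting line index): a negative
-- istart makes A re-read lines through Python's negative-index wraparound (and raise IndexError
-- when istart < -len(lines)), which is outside the function's purpose and which B's slice does not mimic.
def Pre_sweep_scope (lines : List String) (istart : Int) : Prop := 0 ≤ istart
instance (lines : List String) (istart : Int) : Decidable (Pre_sweep_scope lines istart) := by unfold Pre_sweep_scope; infer_instance
def pvWitness_sweep_scope : List String × Int := (["int f() {", "  return g(", "    1);", "}"], 0)
def Spec_sweep_scope (lines : List String) (istart : Int) (out : Int × Int × Int) : Prop := out = sweep_scope_alt lines istart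
instance (lines : List String) (istart : Int) (out : Int × Int × Int) : Decidable (Spec_sweep_scope lines istart out) := by unfold Spec_sweep_scope; infer_instance

-- ===== CLAIM (what is proved, stated in full; the proofs are below) =====
def Claim_equal_sweep_scope : Prop := ∀ (lines : List String) (istart : Int), Dom_sweep_scope lines istart → Pre_sweep_scope lines istart → Spec_sweep_scope lines istart (sweep_scope lines istart)

-- ===== LEMMAS AND PROOFS =====

-- proof-side reference: A's loop restated over the string suffix itself, with the position carried along
def loopS (tail : List String) (pos cnt1 cnt2 max1 max2 istart : Int) : Int × Int × Int :=
  match tail with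
  | [] => (istart, 0, 0)
  | s :: rest =>
    if cnt1 + (PySem.Str.count s "(" : Int) - (PySem.Str.count s ")" : Int) = 0
       ∧ cnt2 + (PySem.Str.count s "{" : Int) - (PySem.Str.count s "}" : Int) = 0
    then (pos, max max1 (cnt1 + (PySem.Str.count s "(" : Int)),
               max max2 (cnt2 + (PySem.Str.count s "{" : Int)))
    else loopS rest (pos + 1)
           (cnt1 + (PySem.Str.count s "(" : Int) - (PySem.Str.count s ")" : Int))
           (cnt2 + (PySem.Str.count s "{" : Int) - (PySem.Str.count s "}" : Int))
           (max max1 (cnt1 + (PySem.Str.count s "(" : Int)))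
           (max max2 (cnt2 + (PySem.Str.count s "{" : Int))) istart

-- A-side bridge: the index loop over range(i, len) equals the suffix loop on lines.drop i
theorem loopA_eq_loopS (lines : List String) :
    ∀ (n : Nat) (i cnt1 cnt2 max1 max2 istart : Int), 0 ≤ i → n = ((lines.length : Int) - i).toNat →
    sweepLoopA lines (PySem.List.pyRange i (lines.length : Int) 1) cnt1 cnt2 max1 max2 istart
      = loopS (lines.drop i.toNat) i cnt1 cnt2 max1 max2 istart := by
  intro n
  induction n with
  | zero =>
    intro i cnt1 cnt2 max1 max2 istart hi hn
    have hle : (lines.length : Int) ≤ i := by omega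
    rw [PySem.List.pyRange_one_eq_nil hle, List.drop_eq_nil_of_le (by omega : lines.length ≤ i.toNat)]
    rfl
  | succ n ih =>
    intro i cnt1 cnt2 max1 max2 istart hi hn
    have hlt : i < (lines.length : Int) := by omega
    have hlen : i.toNat < lines.length := by omega
    have hget : PySem.List.pyGetD lines i "" = lines[i.toNat] := by
      rw [PySem.List.pyGetD_of_nonneg lines "" hi]
      simp [List.getD_eq_getElem?_getD, hlen]
    rw [PySem.List.pyRange_one_cons hlt, List.drop_eq_getElem_cons hlen]
    simp only [sweepLoopA, loopS, hget]
    have hrec := ih (i + 1) (cnt1 + (PySem.Str.count lines[i.toNat] "(" : Int) - (PySem.Str.count lines[i.toNat] ")" : Int))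
      (cnt2 + (PySem.Str.count lines[i.toNat] "{" : Int) - (PySem.Str.count lines[i.toNat] "}" : Int))
      (max max1 (cnt1 + (PySem.Str.count lines[i.toNat] "(" : Int)))
      (max max2 (cnt2 + (PySem.Str.count lines[i.toNat] "{" : Int))) istart (by omega) (by omega)
    have htn : (i + 1).toNat = i.toNat + 1 := by omega
    rw [htn] at hrec
    split
    · rfl
    · exact hrec

-- B-side bridge: the suffix loop equals Source B's two-phase computation, for any starting state
theorem loopS_eq_phases :
    ∀ (tail : List String) (pos cnt1 cnt2 max1 max2 istart : Int),
    loopS tail pos cnt1 cnt2 max1 max2 istart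
      = match PySem.List.index? (sweepScanB tail cnt1 cnt2) ((0 : Int), (0 : Int)) with
        | none => (istart, 0, 0)
        | some k =>
          let pre := ((sweepScanB tail cnt1 cnt2).take (k + 1)).zip (tail.take (k + 1))
          let ms := pre.foldl
            (fun m p => (max m.1 (p.1.1 + (PySem.Str.count p.2 ")" : Int)),
                         max m.2 (p.1.2 + (PySem.Str.count p.2 "}" : Int)))) (max1, max2)
          (pos + k, ms.1, ms.2) := by
  intro tail
  induction tail with
  | nil =>
    intro pos cnt1 cnt2 max1 max2 istart
    simp [loopS, sweepScanB, PySem.List.index?]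
  | cons s rest ih =>
    intro pos cnt1 cnt2 max1 max2 istart
    simp only [loopS, sweepScanB]
    by_cases h : cnt1 + (PySem.Str.count s "(" : Int) - (PySem.Str.count s ")" : Int) = 0
       ∧ cnt2 + (PySem.Str.count s "{" : Int) - (PySem.Str.count s "}" : Int) = 0
    · have hz : (cnt1 + ((PySem.Str.count s "(" : Int) - (PySem.Str.count s ")" : Int)),
                 cnt2 + ((PySem.Str.count s "{" : Int) - (PySem.Str.count s "}" : Int)))
          = ((0 : Int), (0 : Int)) := by
        obtain ⟨h1, h2⟩ := h
        simp only [Prod.mk.injEq]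
        omega
      rw [if_pos h, hz, PySem.List.index?_cons_self]
      simp only [List.take_succ_cons, List.take_zero, List.zip_cons_cons, List.zip_nil_left,
        List.foldl_cons, List.foldl_nil]
      have e1 : (0 : Int) + (PySem.Str.count s ")" : Int) = cnt1 + (PySem.Str.count s "(" : Int) := by omega
      have e2 : (0 : Int) + (PySem.Str.count s "}" : Int) = cnt2 + (PySem.Str.count s "{" : Int) := by omega
      rw [e1, e2]
      simp
    · have hne : (cnt1 + ((PySem.Str.count s "(" : Int) - (PySem.Str.count s ")" : Int)),
                  cnt2 + ((PySem.Str.count s "{" : Int) - (PySem.Str.count s "}" : Int)))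
          ≠ ((0 : Int), (0 : Int)) := by
        simp only [ne_eq, Prod.mk.injEq]
        omega
      rw [if_neg h, PySem.List.index?_cons_of_ne _ hne]
      have harg1 : cnt1 + (PySem.Str.count s "(" : Int) - (PySem.Str.count s ")" : Int)
          = cnt1 + ((PySem.Str.count s "(" : Int) - (PySem.Str.count s ")" : Int)) := by ring
      have harg2 : cnt2 + (PySem.Str.count s "{" : Int) - (PySem.Str.count s "}" : Int)
          = cnt2 + ((PySem.Str.count s "{" : Int) - (PySem.Str.count s "}" : Int)) := by ring
      rw [harg1, harg2, ih]
      cases hidx : PySem.List.index? (sweepScanB rest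
          (cnt1 + ((PySem.Str.count s "(" : Int) - (PySem.Str.count s ")" : Int)))
          (cnt2 + ((PySem.Str.count s "{" : Int) - (PySem.Str.count s "}" : Int)))) ((0 : Int), (0 : Int)) with
      | none => simp
      | some k =>
        have e3 : pos + ((k : Int) + 1) = pos + 1 + (k : Int) := by ring
        simp [e3, List.take_succ_cons, Nat.cast_add, Nat.cast_one]
        have e1' : cnt1 + ((PySem.Chars.count s.toList ['('] : Int) - (PySem.Chars.count s.toList [')'] : Int)) + (PySem.Chars.count s.toList [')'] : Int)
            = cnt1 + (PySem.Chars.count s.toList ['('] : Int) := by ring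
        have e2' : cnt2 + ((PySem.Chars.count s.toList ['{'] : Int) - (PySem.Chars.count s.toList ['}'] : Int)) + (PySem.Chars.count s.toList ['}'] : Int)
            = cnt2 + (PySem.Chars.count s.toList ['{'] : Int) := by ring
        rw [e1', e2']

-- ===== VERDICT (by name: the statement is the Claim_ definition above) =====
theorem sweep_scope_spec : Claim_equal_sweep_scope := by
  intro lines istart _hdom hpre
  unfold Spec_sweep_scope
  unfold sweep_scope sweep_scope_alt
  rw [PySem.List.slice_from lines hpre,
    loopA_eq_loopS lines ((lines.length : Int) - istart).toNat istart 0 0 0 0 istart hpre rfl,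
    loopS_eq_phases]
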